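-- pv_equiv track=rewrite | github.com/CODE-ARCHITECTURE/HeTA | find_non_overlapping_pairs.py | find_non_overlapping_pairs_optimized
-- ===== SOURCE A (Python) =====
-- def find_non_overlapping_pairs_optimized(tasks):
--     # 按开始时间排序任务
--     sorted_tasks = sorted(tasks, key=lambda x: x['start'])
--     n = len(sorted_tasks)
--     non_overlapping_pairs = []
--
--     # 遍历所有任务
--     for i in range(n):
--         task_i = sorted_tasks[i]
--         end_i = task_i['start'] + task_i['duration']
--
--         # 使用二分查找找到第一个开始时间 >= end_i 的任务
--         left = i + 1
--         right = n - 1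
--         first_no_overlap_index = n  # 默认值为 n，表示没有满足条件的任务
--
--         while left <= right:
--             mid = (left + right) // 2
--             if sorted_tasks[mid]['start'] >= end_i:
--                 first_no_overlap_index = mid
--                 right = mid - 1
--             else:
--                 left = mid + 1
--
--         # 记录所有 No Overlap 的任务对
--         for j in range(first_no_overlap_index, n):
--             non_overlapping_pairs.append((i, j))
--
--     return sorted_tasks, non_overlapping_pairs
-- ===== SOURCE B (Python) =====
-- def find_non_overlapping_pairs_optimized(tasks):
--     # Same sort; then a plain nested scan instead of per-i binary search.
--     sorted_tasks = sorted(tasks, key=lambda x: x['start'])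
--     n = len(sorted_tasks)
--     non_overlapping_pairs = []
--     for i in range(n):
--         end_i = sorted_tasks[i]['start'] + sorted_tasks[i]['duration']
--         for j in range(i + 1, n):
--             if sorted_tasks[j]['start'] >= end_i:
--                 non_overlapping_pairs.append((i, j))
--     return sorted_tasks, non_overlapping_pairs
-- ===== Notes on version B (the rewrite author's own statement) =====
-- stated objective: simpler
-- what changed: Replaces A's hand-written per-i binary search plus suffix emission by a plain nested loop that tests sorted_tasks[j]['start'] >= end_i directly for every j > i; sortedness makes the selected set identical.
import Mathlib
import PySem

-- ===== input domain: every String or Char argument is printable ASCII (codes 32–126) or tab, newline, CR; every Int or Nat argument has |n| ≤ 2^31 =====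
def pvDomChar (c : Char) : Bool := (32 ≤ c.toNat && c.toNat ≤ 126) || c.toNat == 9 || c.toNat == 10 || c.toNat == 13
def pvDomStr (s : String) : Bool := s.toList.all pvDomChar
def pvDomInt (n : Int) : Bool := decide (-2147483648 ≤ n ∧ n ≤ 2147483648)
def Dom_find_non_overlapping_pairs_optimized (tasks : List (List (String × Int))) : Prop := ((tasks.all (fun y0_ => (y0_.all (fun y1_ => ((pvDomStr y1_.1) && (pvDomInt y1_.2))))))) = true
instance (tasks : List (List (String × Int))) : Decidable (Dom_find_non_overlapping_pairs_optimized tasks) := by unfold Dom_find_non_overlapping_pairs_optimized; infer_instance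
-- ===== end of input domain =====

-- B replaces A's per-i hand-written binary search (and suffix emission) by a plain nested
-- scan testing each later task's start directly; simpler, same output on the sorted list.

-- t['start'] / t['duration']; under Pre_ the keys are present, so the default is never used.
def pvStart (t : List (String × Int)) : Int := PySem.Dict.getD (PySem.Dict.mk t) "start" 0
def pvDur (t : List (String × Int)) : Int := PySem.Dict.getD (PySem.Dict.mk t) "duration" 0
-- sorted_tasks[j]['start'] (index always in range where used)
def pvStartAt (st : List (List (String × Int))) (j : Int) : Int := pvStart (PySem.List.pyGetD st j [])

-- ===== PORT A =====
-- A's while-loop binary search, step for step (left/right/first_no_overlap_index state).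
def pvBsearch (st : List (List (String × Int))) (endi left right fni : Int) : Int :=
  if h : left ≤ right then
    let mid := PySem.Int.floordiv (left + right) 2
    have hb : left ≤ mid ∧ mid ≤ right := PySem.Int.floordiv_two_mid_bounds h
    if endi ≤ pvStartAt st mid then
      pvBsearch st endi left (mid - 1) mid
    else
      pvBsearch st endi (mid + 1) right fni
  else fni
termination_by (right + 1 - left).toNat
decreasing_by all_goals omega

def find_non_overlapping_pairs_optimized (tasks : List (List (String × Int))) : (List (List (String × Int))) × (List (Int × Int)) :=
  let st := PySem.List.sorted tasks (fun x => pvStart x)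
  let n : Int := (st.length : Int)
  let pairs := (PySem.List.pyRange 0 n).foldl (fun acc i =>
      let ti := PySem.List.pyGetD st i []
      let endi := pvStart ti + pvDur ti
      let fni := pvBsearch st endi (i + 1) (n - 1) n
      (PySem.List.pyRange fni n).foldl (fun acc2 j => acc2 ++ [(i, j)]) acc) []
  (st, pairs)

-- ===== PORT B =====
def find_non_overlapping_pairs_optimized_alt (tasks : List (List (String × Int))) : (List (List (String × Int))) × (List (Int × Int)) :=
  let st := PySem.List.sorted tasks (fun x => pvStart x)
  let n : Int := (st.length : Int)
  let pairs := (PySem.List.pyRange 0 n).foldl (fun acc i =>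
      let endi := pvStart (PySem.List.pyGetD st i []) + pvDur (PySem.List.pyGetD st i [])
      (PySem.List.pyRange (i + 1) n).foldl (fun acc2 j =>
        if endi ≤ pvStartAt st j then acc2 ++ [(i, j)] else acc2) acc) []
  (st, pairs)

-- ===== PRECONDITION & SPEC =====
-- Pre_ excludes exactly the inputs where the Python raises KeyError: some task lacks a
-- 'start' or 'duration' key (both A and B look both keys up on every task).
def Pre_find_non_overlapping_pairs_optimized (tasks : List (List (String × Int))) : Prop :=
  ∀ t ∈ tasks, (PySem.Dict.get? (PySem.Dict.mk t) "start").isSome = true ∧ (PySem.Dict.get? (PySem.Dict.mk t) "duration").isSome = true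
instance (tasks : List (List (String × Int))) : Decidable (Pre_find_non_overlapping_pairs_optimized tasks) := by unfold Pre_find_non_overlapping_pairs_optimized; infer_instance
def pvWitness_find_non_overlapping_pairs_optimized : (List (List (String × Int))) :=
  [[("start", 0), ("duration", 2)], [("start", 3), ("duration", 1)]]

def Spec_find_non_overlapping_pairs_optimized (tasks : List (List (String × Int))) (out : (List (List (String × Int))) × (List (Int × Int))) : Prop := out = find_non_overlapping_pairs_optimized_alt tasks
instance (tasks : List (List (String × Int))) (out : (List (List (String × Int))) × (List (Int × Int))) : Decidable (Spec_find_non_overlapping_pairs_optimized tasks out) := by unfold Spec_find_non_overlapping_pairs_optimized; infer_instance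

-- ===== CLAIM (what is proved, stated in full; the proofs are below) =====
def Claim_equal_find_non_overlapping_pairs_optimized : Prop := ∀ (tasks : List (List (String × Int))), Dom_find_non_overlapping_pairs_optimized tasks → Pre_find_non_overlapping_pairs_optimized tasks → Spec_find_non_overlapping_pairs_optimized tasks (find_non_overlapping_pairs_optimized tasks)

-- ===== LEMMAS AND PROOFS =====

-- On the sorted list, 'start' is monotone in the index.
lemma pvStartAt_mono (tasks : List (List (String × Int))) (p q : Int)
    (hp : 0 ≤ p) (hpq : p ≤ q)
    (hq : q < ((PySem.List.sorted tasks (fun x => pvStart x)).length : Int)) :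
    pvStartAt (PySem.List.sorted tasks (fun x => pvStart x)) p ≤
      pvStartAt (PySem.List.sorted tasks (fun x => pvStart x)) q := by
  have hq0 : 0 ≤ q := le_trans hp hpq
  have hqn : q.toNat < (PySem.List.sorted tasks (fun x => pvStart x)).length := by omega
  have hpn : p.toNat < (PySem.List.sorted tasks (fun x => pvStart x)).length := by omega
  have hmono := PySem.List.key_sorted_getElem_mono tasks (fun x => pvStart x)
    (p := p.toNat) (q := q.toNat) (by omega) hqn
  unfold pvStartAt
  rw [PySem.List.pyGetD_of_nonneg _ _ hp, PySem.List.pyGetD_of_nonneg _ _ hq0,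
      List.getD_eq_getElem _ _ hpn, List.getD_eq_getElem _ _ hqn]
  exact hmono

-- Invariant-carrying specification of A's binary-search loop.
lemma pvBsearch_spec (st : List (List (String × Int))) (endi n : Int)
    (mono : ∀ p q : Int, 0 ≤ p → p ≤ q → q < n → endi ≤ pvStartAt st p → endi ≤ pvStartAt st q) :
    ∀ (k : Nat) (left right fni lo : Int), (right + 1 - left).toNat ≤ k →
    0 ≤ lo → lo ≤ left →
    (∀ j, lo ≤ j → j < left → ¬ endi ≤ pvStartAt st j) →
    (∀ j, fni ≤ j → j < n → endi ≤ pvStartAt st j) →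
    fni = right + 1 → left ≤ fni → right ≤ n - 1 →
    lo ≤ pvBsearch st endi left right fni ∧ pvBsearch st endi left right fni ≤ n ∧
    (∀ j, lo ≤ j → j < pvBsearch st endi left right fni → ¬ endi ≤ pvStartAt st j) ∧
    (∀ j, pvBsearch st endi left right fni ≤ j → j < n → endi ≤ pvStartAt st j) := by
  intro k
  induction k with
  | zero =>
    intro left right fni lo hk hlo hll hne hpo hf hl hr
    have hlr : ¬ left ≤ right := by omega
    rw [pvBsearch, dif_neg hlr]
    refine ⟨by omega, by omega, ?_, hpo⟩
    intro j hj1 hj2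
    exact hne j hj1 (by omega)
  | succ k ih =>
    intro left right fni lo hk hlo hll hne hpo hf hl hr
    by_cases hlr : left ≤ right
    · rw [pvBsearch, dif_pos hlr]
      have hb := PySem.Int.floordiv_two_mid_bounds hlr
      set mid := PySem.Int.floordiv (left + right) 2 with hmid
      simp only []
      by_cases hp : endi ≤ pvStartAt st mid
      · rw [if_pos hp]
        refine ih left (mid - 1) mid lo (by omega) hlo hll hne ?_ (by omega) (by omega) (by omega)
        intro j hj1 hj2
        exact mono mid j (by omega) hj1 hj2 hp
      · rw [if_neg hp]
        refine ih (mid + 1) right fni lo (by omega) hlo (by omega) ?_ hpo hf (by omega) hr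
        intro j hj1 hj2 hcon
        exact hp (mono j mid (by omega) (by omega) (by omega) hcon)
    · rw [pvBsearch, dif_neg hlr]
      refine ⟨by omega, by omega, ?_, hpo⟩
      intro j hj1 hj2
      exact hne j hj1 (by omega)

-- The qualifying j's in [i+1, n) are exactly the suffix [fni, n) that A emits.
lemma filter_eq_suffix (st : List (List (String × Int))) (endi n i fni : Int)
    (h1 : i + 1 ≤ fni) (h2 : fni ≤ n)
    (hne : ∀ j, i + 1 ≤ j → j < fni → ¬ endi ≤ pvStartAt st j)
    (hpo : ∀ j, fni ≤ j → j < n → endi ≤ pvStartAt st j) :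
    (PySem.List.pyRange (i + 1) n).filter (fun j => decide (endi ≤ pvStartAt st j)) =
      PySem.List.pyRange fni n := by
  rw [PySem.List.pyRange_one_append (i + 1) fni n h1 h2, List.filter_append]
  have ha : (PySem.List.pyRange (i + 1) fni).filter (fun j => decide (endi ≤ pvStartAt st j)) = [] := by
    rw [List.filter_eq_nil_iff]
    intro a ha
    rw [PySem.List.mem_pyRange_one] at ha
    simpa using hne a ha.1 ha.2
  have hbb : (PySem.List.pyRange fni n).filter (fun j => decide (endi ≤ pvStartAt st j)) =
      PySem.List.pyRange fni n := by
    rw [List.filter_eq_self]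
    intro a ha
    rw [PySem.List.mem_pyRange_one] at ha
    simpa using hpo a ha.1 ha.2
  rw [ha, hbb, List.nil_append]

-- ===== VERDICT (by name: the statement is the Claim_ definition above) =====
theorem find_non_overlapping_pairs_optimized_spec : Claim_equal_find_non_overlapping_pairs_optimized := by
  intro tasks _ _
  unfold Spec_find_non_overlapping_pairs_optimized
  unfold find_non_overlapping_pairs_optimized find_non_overlapping_pairs_optimized_alt
  simp only []
  set st := PySem.List.sorted tasks (fun x => pvStart x) with hst
  set n : Int := (st.length : Int) with hn
  refine congrArg (Prod.mk st) ?_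
  refine (PySem.List.foldl_congr_mem _ _ _ _ ?_).symm
  intro acc i hi
  rw [PySem.List.mem_pyRange_one] at hi
  set endi := pvStart (PySem.List.pyGetD st i []) + pvDur (PySem.List.pyGetD st i []) with hendi
  have mono : ∀ p q : Int, 0 ≤ p → p ≤ q → q < n → endi ≤ pvStartAt st p → endi ≤ pvStartAt st q := by
    intro p q hp hpq hq hle
    exact le_trans hle (pvStartAt_mono tasks p q hp hpq hq)
  have hspec := pvBsearch_spec st endi n mono (n - 1 + 1 - (i + 1)).toNat (i + 1) (n - 1) n (i + 1)
    (le_refl _) (by omega) (le_refl _) (by omega) (by omega) (by omega) (by omega) (by omega)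
  set fni := pvBsearch st endi (i + 1) (n - 1) n with hfni
  obtain ⟨hs1, hs2, hs3, hs4⟩ := hspec
  rw [PySem.List.foldl_append_singleton_eq_map (fun j => (i, j)),
      PySem.List.foldl_append_ite (fun j => endi ≤ pvStartAt st j) (fun j => (i, j)),
      filter_eq_suffix st endi n i fni hs1 hs2 hs3 hs4]
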